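-- pv_equiv track=rewrite | github.com/cheon4050/coding-test | 프로그래머스 카카오/무지의 먹방라이브.py | solution
-- ===== SOURCE A (Python) =====
-- def solution(food_times, k):
--     food_min_time = sorted(food_times)
--     cnt = 0
--     fcnt = 0
--     answer = 0
--     for time in range(len(food_min_time)):
--         food_min_time[time] -= cnt
--         if k < food_min_time[time] * (len(food_times) - fcnt):
--             for a in range(food_min_time[time], 0, -1):
--                 if k >= a * (len(food_times) - fcnt):
--                     k -= a * (len(food_times) - fcnt)
--                     break
--             food_min_time[time] += cnt
--             answer = food_min_time[time]
--             break
--         k -= food_min_time[time] * (len(food_times) - fcnt)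
--         cnt += food_min_time[time]
--         fcnt += 1
--     else:
--         return -1
--     for i in range(len(food_times)):
--         if food_times[i] < answer:
--             continue
--         else:
--             k -= 1
--         if k < 0:
--             return i + 1
--     else:
--         for i in range(len(food_times)):
--             if food_times[i] < answer + 1:
--                 continue
--             else:
--                 k -= 1
--             if k < 0:
--                 return i + 1
-- ===== SOURCE B (Python) =====
-- def _kth_at_least(food_times, v, t):
--     # index (1-based) of the (t+1)-th food whose remaining time is >= v
--     for idx, f in enumerate(food_times, 1):
--         if f >= v:
--             if t == 0:
--                 return idx
--             t -= 1
--     return -1  # unreachable: v itself is an element of food_times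
--
--
-- def solution(food_times, k):
--     n = len(food_times)
--     cnt = 0
--     for i, v in enumerate(sorted(food_times)):
--         rem = n - i
--         if k < (v - cnt) * rem:
--             return _kth_at_least(food_times, v, max(k, 0) % rem)
--         k -= (v - cnt) * rem
--         cnt = v
--     return -1
-- ===== Notes on version B (the rewrite author's own statement) =====
-- stated objective: alternative
-- what changed: The downward linear scan over candidate round counts (O(max food value) steps) is replaced by a single floor-division/modulo (k %= remaining dish count), and the two-pass final index search (whose second loop is dead code) collapses into one counting pass returning the k-th remaining dish.
import Mathlib
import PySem

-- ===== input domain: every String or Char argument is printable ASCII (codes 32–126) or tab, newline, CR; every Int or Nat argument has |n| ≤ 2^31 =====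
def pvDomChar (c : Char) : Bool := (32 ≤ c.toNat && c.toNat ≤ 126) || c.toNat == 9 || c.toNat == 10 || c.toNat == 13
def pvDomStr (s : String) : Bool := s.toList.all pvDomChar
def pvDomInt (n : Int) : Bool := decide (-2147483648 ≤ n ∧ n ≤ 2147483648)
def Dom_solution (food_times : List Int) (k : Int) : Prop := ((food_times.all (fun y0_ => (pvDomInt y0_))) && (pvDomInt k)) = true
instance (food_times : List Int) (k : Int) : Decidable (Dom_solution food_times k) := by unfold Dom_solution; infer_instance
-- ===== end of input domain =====

-- B replaces A's downward scan over candidate round counts by one floor-mod of k by the remaining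
-- dish count, and A's two final index passes (the second one dead code) by a single counting pass.

-- ===== PORT A =====
-- inner loop of A: `for a in range(food_min_time[time], 0, -1): if k >= a*rem: k -= a*rem; break`
def innerScanA (k rem a : Int) : Int :=
  if _h : a ≤ 0 then k
  else if a * rem ≤ k then k - a * rem
  else innerScanA k rem (a - 1)
termination_by a.toNat
decreasing_by omega

-- first loop of A over the sorted copy; state (k, cnt, fcnt); none models `else: return -1`,
-- some (answer, k) models the break.
def outerA (n : Int) : List Int → Int → Int → Int → Option (Int × Int)
  | [], _, _, _ => none
  | v :: rest, k, cnt, fcnt =>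
    if k < (v - cnt) * (n - fcnt) then some ((v - cnt) + cnt, innerScanA k (n - fcnt) (v - cnt))
    else outerA n rest (k - (v - cnt) * (n - fcnt)) (cnt + (v - cnt)) (fcnt + 1)

-- second (and dead third) loop of A; (some result, _) on `return i+1`, (none, final k) on fall-through.
def scanA (ans : Int) : List Int → Int → Int → Option Int × Int
  | [], _, k => (none, k)
  | f :: rest, i, k =>
    if f < ans then scanA ans rest (i + 1) k
    else if k - 1 < 0 then (some (i + 1), k - 1)
    else scanA ans rest (i + 1) (k - 1)

def solution (food_times : List Int) (k : Int) : Int :=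
  match outerA food_times.length (PySem.List.sorted food_times (fun x => x) false) k 0 0 with
  | none => -1
  | some (ans, k1) =>
    match scanA ans food_times 0 k1 with
    | (some r, _) => r
    | (none, k2) =>
      match scanA (ans + 1) food_times 0 k2 with
      | (some r, _) => r
      | (none, _) => 0  -- Python falls off and returns None here; unreachable (some dish is ≥ ans)

-- ===== PORT B =====
-- Source B _kth_at_least: 1-based index of the (t+1)-th dish with remaining time ≥ v
def kthAtLeastB (v : Int) : List Int → Int → Int → Int
  | [], _, _ => -1
  | f :: rest, idx, t =>
    if v ≤ f then (if t = 0 then idx else kthAtLeastB v rest (idx + 1) (t - 1))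
    else kthAtLeastB v rest (idx + 1) t

-- Source B main loop over enumerate(sorted(food_times)) with state (k, cnt)
def outerB (food : List Int) (n : Int) : List Int → Int → Int → Int → Int
  | [], _, _, _ => -1
  | v :: rest, i, k, cnt =>
    if k < (v - cnt) * (n - i) then kthAtLeastB v food 1 (PySem.Int.mod (max k 0) (n - i))
    else outerB food n rest (i + 1) (k - (v - cnt) * (n - i)) v

def solution_alt (food_times : List Int) (k : Int) : Int :=
  outerB food_times food_times.length (PySem.List.sorted food_times (fun x => x) false) 0 k 0

-- ===== PRECONDITION & SPEC =====
def Spec_solution (food_times : List Int) (k : Int) (out : Int) : Prop := out = solution_alt food_times k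
instance (food_times : List Int) (k : Int) (out : Int) : Decidable (Spec_solution food_times k out) := by unfold Spec_solution; infer_instance

-- ===== CLAIM (what is proved, stated in full; the proofs are below) =====
def Claim_equal_solution : Prop := ∀ (food_times : List Int) (k : Int), Dom_solution food_times k → Spec_solution food_times k (solution food_times k)

-- ===== LEMMAS AND PROOFS =====

theorem innerScanA_eq (k rem : Int) (hrem : 0 < rem) :
    ∀ a : Int, k < (a + 1) * rem →
      innerScanA k rem a = if 0 ≤ k then PySem.Int.mod k rem else k := by
  intro a
  induction a using innerScanA.induct k rem with
  | case1 a ha =>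
    intro hk
    rw [innerScanA, dif_pos ha]
    by_cases h0 : 0 ≤ k
    · rw [if_pos h0, PySem.Int.mod_eq_emod_of_pos hrem]
      have hle : (a + 1) * rem ≤ 1 * rem :=
        mul_le_mul_of_nonneg_right (by omega) (le_of_lt hrem)
      have : k < rem := by nlinarith
      exact (Int.emod_eq_of_lt h0 this).symm
    · rw [if_neg h0]
  | case2 a ha hge =>
    intro hk
    rw [innerScanA, dif_neg ha, if_pos hge]
    have harem : rem ≤ a * rem := by nlinarith
    have h0 : 0 ≤ k := by nlinarith
    rw [if_pos h0, PySem.Int.mod_eq_emod_of_pos hrem]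
    have h1 : (k - a * rem) % rem = k % rem := Int.sub_mul_emod_self_right k a rem
    have hub : k - a * rem < rem := by nlinarith
    have hlb : 0 ≤ k - a * rem := by nlinarith
    have h2 : (k - a * rem) % rem = k - a * rem := Int.emod_eq_of_lt hlb hub
    omega
  | case3 a ha hlt ih =>
    intro hk
    rw [innerScanA, dif_neg ha, if_neg (by omega : ¬ a * rem ≤ k)]
    exact ih (by nlinarith)

theorem scanA_eq (ans : Int) :
    ∀ (l : List Int) (i k : Int),
      max k 0 < (l.countP (fun f => decide (ans ≤ f)) : Int) →
      (scanA ans l i k).1 = some (kthAtLeastB ans l (i + 1) (max k 0)) := by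
  intro l
  induction l with
  | nil => intro i k h; simp [List.countP] at h
  | cons f rest ih =>
    intro i k h
    by_cases hf : f < ans
    · rw [scanA, if_pos hf, kthAtLeastB, if_neg (by omega : ¬ ans ≤ f)]
      have hnf : ¬ ans ≤ f := by omega
      have hc : ((f :: rest).countP (fun f => decide (ans ≤ f)) : Int) =
          (rest.countP (fun f => decide (ans ≤ f)) : Int) := by
        simp [hnf]
      exact ih (i + 1) k (by omega)
    · have hvf : ans ≤ f := by omega
      have hcnt : ((f :: rest).countP (fun f => decide (ans ≤ f)) : Int) =
          (rest.countP (fun f => decide (ans ≤ f)) : Int) + 1 := by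
        simp [hvf]
      rw [scanA, if_neg hf, kthAtLeastB, if_pos hvf]
      by_cases hk0 : k - 1 < 0
      · rw [if_pos hk0, if_pos (by omega : max k 0 = 0)]
      · rw [if_neg hk0, if_neg (by omega : ¬ max k 0 = 0)]
        have hm : max (k - 1) 0 = max k 0 - 1 := by omega
        rw [← hm]
        exact ih (i + 1) (k - 1) (by omega)

theorem outer_eq (food : List Int) (sf : List Int)
    (hperm : sf.Perm food) (hpair : sf.Pairwise (· ≤ ·)) :
    ∀ (l pre : List Int), sf = pre ++ l → ∀ (k cnt : Int),
      (match outerA food.length l k cnt pre.length with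
       | none => -1
       | some (ans, k1) =>
         match scanA ans food 0 k1 with
         | (some r, _) => r
         | (none, k2) =>
           match scanA (ans + 1) food 0 k2 with
           | (some r, _) => r
           | (none, _) => 0)
      = outerB food food.length l (pre.length : Int) k cnt := by
  intro l
  induction l with
  | nil => intro pre hsf k cnt; rw [outerA, outerB]
  | cons v rest ih =>
    intro pre hsf k cnt
    have hlen : sf.length = food.length := hperm.length_eq
    have hlen2 : sf.length = pre.length + (rest.length + 1) := by
      rw [hsf]; simp
    have hrem : (food.length : Int) - (pre.length : Int) = (rest.length : Int) + 1 := by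
      omega
    have hrempos : (0 : Int) < (food.length : Int) - (pre.length : Int) := by omega
    rw [outerA, outerB]
    by_cases hbr : k < (v - cnt) * ((food.length : Int) - (pre.length : Int))
    · rw [if_pos hbr, if_pos hbr]
      set rem : Int := (food.length : Int) - (pre.length : Int) with hremdef
      have hk1 : innerScanA k rem (v - cnt) = if 0 ≤ k then PySem.Int.mod k rem else k :=
        innerScanA_eq k rem hrempos (v - cnt) (by nlinarith)
      have ht : PySem.Int.mod (max k 0) rem = max (innerScanA k rem (v - cnt)) 0 := by
        by_cases h0 : 0 ≤ k
        · rw [hk1, if_pos h0, max_eq_left h0,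
            max_eq_left (PySem.Int.mod_nonneg k hrempos)]
        · rw [hk1, if_neg h0, max_eq_right (by omega : k ≤ 0),
            PySem.Int.mod_eq_emod_of_pos hrempos]
          exact Int.zero_emod rem
      have hpair2 : (v :: rest).Pairwise (· ≤ ·) :=
        (List.pairwise_append.mp (hsf ▸ hpair)).2.1
      have hvrest : ∀ f ∈ rest, v ≤ f := (List.pairwise_cons.mp hpair2).1
      have hcrest : rest.countP (fun f => decide (v ≤ f)) = rest.length :=
        List.countP_eq_length.mpr (fun a ha => by simpa using hvrest a ha)
      have hcfood : rem ≤ (food.countP (fun f => decide (v ≤ f)) : Int) := by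
        have hcp : food.countP (fun f => decide (v ≤ f))
            = sf.countP (fun f => decide (v ≤ f)) := (hperm.countP_eq _).symm
        rw [hcp, hsf, List.countP_append, List.countP_cons, hcrest]
        simp only [le_refl, decide_true]
        push_cast
        omega
      have hmaxlt : max (innerScanA k rem (v - cnt)) 0 < rem := by
        by_cases h0 : 0 ≤ k
        · rw [hk1, if_pos h0]
          have h1 := PySem.Int.mod_lt k hrempos
          have h2 := PySem.Int.mod_nonneg k hrempos
          omega
        · rw [hk1, if_neg h0]; omega
      have hs := scanA_eq v food 0 (innerScanA k rem (v - cnt)) (by omega)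
      have hvc : v - cnt + cnt = v := by ring
      rw [hvc]
      rcases hsc : scanA v food 0 (innerScanA k rem (v - cnt)) with ⟨o, kx⟩
      have hs' : o = some (kthAtLeastB v food (0 + 1) (max (innerScanA k rem (v - cnt)) 0)) := by
        rw [hsc] at hs; exact hs
      subst hs'
      rw [ht]
      show (match scanA v food 0 (innerScanA k rem (v - cnt)) with
            | (some r, _) => r
            | (none, k2) =>
              match scanA (v + 1) food 0 k2 with
              | (some r, _) => r
              | (none, _) => 0)
          = kthAtLeastB v food 1 (max (innerScanA k rem (v - cnt)) 0)
      rw [hsc]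
      norm_num
    · rw [if_neg hbr, if_neg hbr]
      have hsf' : sf = (pre ++ [v]) ++ rest := by simpa using hsf
      have hcv : cnt + (v - cnt) = v := by ring
      have := ih (pre ++ [v]) hsf' (k - (v - cnt) * ((food.length : Int) - (pre.length : Int))) v
      rw [hcv]
      simpa [List.length_append, add_comm] using this

-- ===== VERDICT (by name: the statement is the Claim_ definition above) =====
theorem solution_spec : Claim_equal_solution := by
  intro food k _
  unfold Spec_solution solution solution_alt
  have h := outer_eq food (PySem.List.sorted food (fun x => x) false)
    (PySem.List.sorted_perm food (fun x => x) false)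
    (PySem.List.sorted_pairwise food (fun x => x))
    (PySem.List.sorted food (fun x => x) false) [] rfl k 0
  simpa using h
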